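-- pv_equiv track=rewrite | github.com/DamonGeelen/Advent-of-Code | 2023/Day 14/puzzle2.py | south_tilt
-- ===== SOURCE A (Python) =====
-- def south_tilt(lines):
--
--     for i in reversed(range(0, len(lines) - 1)):
--
--         for j in range(len(lines[i])):
--
--             if lines[i][j] == "O":
--                 lines[i][j] = "."
--
--                 n = i + 1
--                 while n < len(lines) and lines[n][j] == ".":
--                     n += 1
--
--                 lines[n - 1][j] = "O"
--
--     return lines
-- ===== SOURCE B (Python) =====
-- def south_tilt(lines):
--     rows = len(lines)
--     cols = max((len(row) for row in lines), default=0)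
--     for j in range(cols):
--         land = rows - 1
--         for i in range(rows - 1, -1, -1):
--             row = lines[i]
--             if j >= len(row):
--                 land = i - 1          # missing cell: nothing can fall past it
--             elif row[j] == "O":
--                 row[j] = "."
--                 lines[land][j] = "O"
--                 land -= 1
--             elif row[j] != ".":
--                 land = i - 1
--     return lines
-- ===== Notes on version B (the rewrite author's own statement) =====
-- stated objective: alternative
-- what changed: Replaced the row-by-row loop that re-scans downward through empty cells for every rock with a per-column single bottom-up pass that tracks the next free landing row (and, on ragged grids, returns where A raises IndexError).
import Mathlib
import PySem

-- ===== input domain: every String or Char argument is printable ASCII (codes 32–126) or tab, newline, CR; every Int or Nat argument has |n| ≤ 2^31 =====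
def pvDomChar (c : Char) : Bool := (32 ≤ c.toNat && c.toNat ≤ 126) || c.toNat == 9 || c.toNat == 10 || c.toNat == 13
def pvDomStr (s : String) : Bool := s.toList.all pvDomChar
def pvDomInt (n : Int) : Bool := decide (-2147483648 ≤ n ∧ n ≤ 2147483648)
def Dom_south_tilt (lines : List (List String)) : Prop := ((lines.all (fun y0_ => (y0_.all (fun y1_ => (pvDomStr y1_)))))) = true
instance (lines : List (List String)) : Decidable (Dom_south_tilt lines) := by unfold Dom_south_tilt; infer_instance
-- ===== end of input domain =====

-- B replaces A's row-by-row loop (which re-scans downward through empty cells for every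
-- rock) by a per-column single bottom-up pass tracking the next free landing row.
-- Both Pythons mutate `lines` in place and return it; the equivalence proved here is
-- about the returned grid (the in-place mutations of the two programs coincide with it).


-- ===== PORT A =====
-- `lines[i][j] = v` (used by both ports; rows keep their lengths)
def setCell (g : List (List String)) (i j : Nat) (v : String) : List (List String) :=
  g.set i ((g.getD i []).set j v)

-- the scan `while n < len(lines) and lines[n][j] == ".": n += 1`; where Python would
-- raise IndexError (row n shorter than j+1) the read defaults to "" and the scan stops —
-- exactly those inputs are excluded by Pre_ below
def aWhile (g : List (List String)) (j n : Nat) : Nat :=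
  if h : n < g.length ∧ (g.getD n []).getD j "" = "." then aWhile g j (n + 1) else n
  termination_by g.length - n
  decreasing_by obtain ⟨h1, -⟩ := h; omega

-- body of A's inner `for j` loop
def aInner (i : Nat) (g : List (List String)) (j : Nat) : List (List String) :=
  if (g.getD i []).getD j "" = "O" then
    let g1 := setCell g i j "."
    let n := aWhile g1 j (i + 1)
    setCell g1 (n - 1) j "O"
  else g

-- body of A's outer `for i` loop: `for j in range(len(lines[i])): …`
def aRow (g : List (List String)) (i : Nat) : List (List String) :=
  (List.range ((g.getD i []).length)).foldl (aInner i) g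

def south_tilt (lines : List (List String)) : List (List String) :=
  ((List.range (lines.length - 1)).reverse).foldl aRow lines

-- ===== PORT B =====
-- body of B's inner `for i in range(rows-1, -1, -1)` loop; state = (grid, land).
-- Under Pre_ `land` is ≥ 0 whenever the "O" branch fires, so `.toNat` is exact.
def bInner (j : Nat) (s : List (List String) × Int) (i : Nat) : List (List String) × Int :=
  if (s.1.getD i []).length ≤ j then (s.1, (i : Int) - 1)
  else
    let c := (s.1.getD i []).getD j ""
    if c = "O" then (setCell (setCell s.1 i j ".") s.2.toNat j "O", s.2 - 1)
    else if c = "." then s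
    else (s.1, (i : Int) - 1)

def south_tilt_alt (lines : List (List String)) : List (List String) :=
  let rows := lines.length
  let cols := (lines.map (fun row => row.length)).foldl max 0
  (List.range cols).foldl
    (fun g j => (((List.range rows).reverse).foldl (bInner j) (g, (rows : Int) - 1)).1) lines

-- ===== PRECONDITION & SPEC =====
-- The pattern on which Python A raises IndexError: some rock "O" sits above an unbroken
-- run of "." cells that ends at a row too short for the rock's column.
def pvHoleFall (lines : List (List String)) : Prop :=
  ∃ i ∈ List.range lines.length, ∃ n ∈ List.range lines.length, i < n ∧
    ∃ j ∈ List.range (lines.getD i []).length,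
      (lines.getD i []).getD j "" = "O" ∧ (lines.getD n []).length ≤ j ∧
      ∀ q ∈ List.range lines.length, i < q → q < n →
        j < (lines.getD q []).length ∧ (lines.getD q []).getD j "" = "."

-- Pre_ excludes exactly the inputs on which A raises IndexError (a rock falling through
-- dots into a missing cell of a ragged grid); it excludes no input on which A returns.
-- (B returns the settled grid there, treating the short row as a blocker.)
def Pre_south_tilt (lines : List (List String)) : Prop := ¬ pvHoleFall lines
instance (lines : List (List String)) : Decidable (Pre_south_tilt lines) := by
  unfold Pre_south_tilt; unfold pvHoleFall; infer_instance

def pvWitness_south_tilt : List (List String) := [["O", "."], [".", "#"], [".", "."]]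

def Spec_south_tilt (lines : List (List String)) (out : List (List String)) : Prop := out = south_tilt_alt lines
instance (lines : List (List String)) (out : List (List String)) : Decidable (Spec_south_tilt lines out) := by unfold Spec_south_tilt; infer_instance

-- ===== CLAIM (what is proved, stated in full; the proofs are below) =====
def Claim_equal_south_tilt : Prop := ∀ (lines : List (List String)), Dom_south_tilt lines → Pre_south_tilt lines → Spec_south_tilt lines (south_tilt lines)

-- ===== LEMMAS AND PROOFS =====

-- column j of the grid (missing cells and cells past a row's end read as "", a blocker
-- that neither port ever writes to)
def colj (g : List (List String)) (j : Nat) : List String := g.map (fun r => r.getD j "")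

-- one falling rock: "O" swaps with the "."s directly below it
def fall : List String → List String
  | x :: y :: t => if x = "O" ∧ y = "." then "." :: fall ("O" :: t) else x :: y :: t
  | l => l
  termination_by l => l.length
  decreasing_by simp

def dots (c : List String) : Nat := (c.takeWhile (fun s => s == ".")).length

-- per-column effect of A: rows processed bottom-up, each rock dropped by `fall`
def acol : List String → List String
  | [] => []
  | x :: xs => fall (x :: acol xs)

-- per-column effect of B: bottom-up pass, land index relative to the current suffix
def bcol : List String → List String × Int
  | [] => ([], -1)
  | x :: xs =>
    let p := bcol xs
    if x = "O" then (("." :: p.1).set (p.2 + 1).toNat "O", p.2)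
    else if x = "." then ("." :: p.1, p.2 + 1)
    else (x :: p.1, -1)

-- per-column view of A's inner-loop body at row i
def Tstep (i : Nat) (c : List String) : List String := c.take i ++ fall (c.drop i)

def applyT : List Nat → List String → List String
  | [], c => c
  | i :: is, c => applyT is (Tstep i c)

-- A's column transform after processing rows m-1 … 0
def am : Nat → List String → List String
  | 0, c => c
  | _ + 1, [] => []
  | m + 1, x :: t => fall (x :: am m t)

-- per-column view of B's inner-loop body at row i
def bStep (i : Nat) (s : List String × Int) : List String × Int :=
  let x := s.1.getD i ""
  if x = "O" then ((s.1.set i ".").set s.2.toNat "O", s.2 - 1)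
  else if x = "." then s
  else (s.1, (i : Int) - 1)

def applyB : List Nat → (List String × Int) → (List String × Int)
  | [], s => s
  | i :: is, s => applyB is (bStep i s)

-- invariant of B's downward pass on one column: the cells strictly below the next row m
-- up to the landing index are all "."
def Qinv (c : List String) (m : Nat) (land : Int) : Prop :=
  (m : Int) - 1 ≤ land ∧ ∀ q : Nat, m ≤ q → (q : Int) ≤ land → c.getD q "" = "."

-- ---- small facts about fall / dots / the column recursions ----

theorem fall_nil : fall [] = [] := by unfold fall; rfl

theorem fall_of_ne (x : String) (c : List String) (hx : x ≠ "O") : fall (x :: c) = x :: c := by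
  cases c with
  | nil => unfold fall; rfl
  | cons y t => rw [fall]; simp [hx]

theorem dots_nil : dots [] = 0 := rfl

theorem dots_cons_dot (c : List String) : dots ("." :: c) = dots c + 1 := by
  simp [dots, List.takeWhile_cons]

theorem dots_cons_ne (x : String) (c : List String) (hx : x ≠ ".") : dots (x :: c) = 0 := by
  simp [dots, List.takeWhile_cons, hx]

theorem fall_O (c : List String) : fall ("O" :: c) = ("." :: c).set (dots c) "O" := by
  induction c with
  | nil => unfold fall; rfl
  | cons y t ih =>
    by_cases hy : y = "."
    · subst hy
      rw [fall]
      simp [dots_cons_dot, ih, dots_cons_dot]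
    · rw [fall]
      simp [hy, dots_cons_ne y t hy]

theorem dots_set (ys : List String) :
    dots (("." :: ys).set (dots ys) "O") = dots ys := by
  induction ys with
  | nil => rfl
  | cons y t ih =>
    by_cases hy : y = "."
    · subst hy
      rw [dots_cons_dot, List.set_cons_succ, dots_cons_dot, ih]
    · rw [dots_cons_ne y t hy, List.set_cons_zero, dots_cons_ne _ _ (by decide)]

theorem col_eq (c : List String) :
    acol c = (bcol c).1 ∧ (bcol c).2 = (dots ((bcol c).1) : Int) - 1 := by
  induction c with
  | nil => exact ⟨rfl, rfl⟩
  | cons x t ih =>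
    obtain ⟨ih1, ih2⟩ := ih
    by_cases hO : x = "O"
    · subst hO
      have htn : ((bcol t).2 + 1).toNat = dots ((bcol t).1) := by omega
      constructor
      · show fall ("O" :: acol t) = _
        rw [ih1, fall_O, bcol]
        simp [htn]
      · rw [bcol]; simp [htn, dots_set]
        omega
    · by_cases hd : x = "."
      · subst hd
        refine ⟨?_, ?_⟩
        · show fall ("." :: acol t) = _
          rw [fall_of_ne _ _ (by decide), ih1, bcol]; simp
        · rw [bcol]; simp [dots_cons_dot]
          omega
      · refine ⟨?_, ?_⟩
        · show fall (x :: acol t) = _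
          rw [fall_of_ne _ _ hO, ih1, bcol]; simp [hO, hd]
        · rw [bcol]; simp [hO, hd, dots_cons_ne x _ hd]

-- ---- columns of grids and setCell ----

theorem length_colj (g : List (List String)) (j : Nat) : (colj g j).length = g.length := by
  simp [colj]

theorem getD_colj (g : List (List String)) (i j : Nat) :
    (colj g j).getD i "" = (g.getD i []).getD j "" := by
  induction g generalizing i with
  | nil => simp [colj]
  | cons r t ih =>
    cases i with
    | zero => simp [colj]
    | succ i => simpa [colj] using ih i

theorem cell_real (g : List (List String)) (i j : Nat)
    (h : (g.getD i []).getD j "" ≠ "") : j < (g.getD i []).length := by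
  by_contra hh
  push_neg at hh
  rw [List.getD_eq_default _ _ hh] at h
  exact h rfl

theorem dots_getD_dot : ∀ (c : List String) (q : Nat), q < dots c → c.getD q "" = "." := by
  intro c
  induction c with
  | nil => intro q hq; rw [dots_nil] at hq; omega
  | cons x t ih =>
    intro q hq
    by_cases hx : x = "."
    · subst hx
      cases q with
      | zero => rfl
      | succ q =>
        rw [List.getD_cons_succ]
        rw [dots_cons_dot] at hq
        exact ih q (by omega)
    · rw [dots_cons_ne x t hx] at hq; omega

theorem rowlens_setCell (g : List (List String)) (i j : Nat) (v : String) :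
    (setCell g i j v).map (fun r => r.length) = g.map (fun r => r.length) := by
  rw [setCell, List.map_set]
  by_cases hi : i < g.length
  · have h1 : ((g.getD i []).set j v).length = (g.map (fun r => r.length))[i]'(by simpa using hi) := by
      rw [List.getD_eq_getElem g [] hi]
      simp
    rw [h1, List.set_getElem_self]
  · exact List.set_eq_of_length_le (by simp; omega)

theorem getD_rowlen (g : List (List String)) (i : Nat) :
    (g.getD i []).length = (g.map (fun r => r.length)).getD i 0 := by
  by_cases hi : i < g.length
  · rw [List.getD_eq_getElem g [] hi, List.getD_eq_getElem _ 0 (by simpa using hi)]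
    simp
  · rw [List.getD_eq_default _ _ (by omega), List.getD_eq_default _ _ (by simp; omega)]
    rfl

theorem length_of_rowlens {g1 g2 : List (List String)}
    (h : g1.map (fun r => r.length) = g2.map (fun r => r.length)) : g1.length = g2.length := by
  have := congrArg List.length h
  simpa using this

theorem getD_set_row (g : List (List String)) (i : Nat) (r : List String) (hi : i < g.length) :
    (g.set i r).getD i [] = r := by
  rw [List.getD_eq_getElem _ _ (by simpa using hi)]
  simp

theorem colj_setCell_self (g : List (List String)) (i j : Nat) (v : String)
    (hjlen : j < (g.getD i []).length) :
    colj (setCell g i j v) j = (colj g j).set i v := by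
  by_cases hi : i < g.length
  · rw [setCell, colj, List.map_set]
    rw [colj]
    congr 1
    simp only [List.getD] at hjlen ⊢
    simp [List.getElem?_set, hjlen]
  · exfalso
    rw [List.getD_eq_default _ _ (by omega)] at hjlen
    simp at hjlen

theorem colj_setCell_ne (g : List (List String)) (i j j' : Nat) (v : String) (hne : j' ≠ j) :
    colj (setCell g i j v) j' = colj g j' := by
  rw [setCell, colj, List.map_set, colj]
  have hv : ((g.getD i []).set j v).getD j' "" = ((g.map (fun r => r.getD j' "")).getD i "") := by
    rw [List.getD, List.getElem?_set_ne (by omega)]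
    by_cases hi : i < g.length
    · rw [List.getD_eq_getElem _ _ hi, List.getD_eq_getElem _ _ (by simpa using hi)]
      simp [List.getD]
    · rw [List.getD_eq_default _ _ (by omega), List.getD_eq_default _ _ (by simpa using (by omega : g.length ≤ i))]
      simp
  rw [hv]
  by_cases hi : i < g.length
  · exact List.set_getElem_self (by simpa using hi) ▸ (by
      rw [List.getD_eq_getElem _ _ (by simpa using hi)]
      exact List.set_getElem_self (by simpa using hi))
  · exact List.set_eq_of_length_le (by simpa using (by omega : g.length ≤ i))

-- ---- A: from the grid loops to acol ----

theorem aWhile_eq (g : List (List String)) (j n : Nat) :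
    aWhile g j n = n + dots ((colj g j).drop n) := by
  fun_induction aWhile with
  | case1 n h ih =>
    have hlen : n < (colj g j).length := by rw [length_colj]; exact h.1
    have hval : (colj g j)[n] = "." := by
      have hg := getD_colj g n j
      rw [List.getD_eq_getElem _ _ hlen] at hg
      rw [hg, h.2]
    rw [ih, List.drop_eq_getElem_cons hlen, hval, dots_cons_dot]
    omega
  | case2 n h =>
    by_cases hlen : n < g.length
    · have hlc : n < (colj g j).length := by rw [length_colj]; exact hlen
      have hval : (colj g j)[n] ≠ "." := by
        have hg := getD_colj g n j
        rw [List.getD_eq_getElem _ _ hlc] at hg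
        rw [hg]
        intro hcon
        exact h ⟨hlen, hcon⟩
      rw [List.drop_eq_getElem_cons hlc, dots_cons_ne _ _ hval]; omega
    · rw [List.drop_eq_nil_of_le (by rw [length_colj]; omega), dots_nil]; omega

theorem Tstep_noop {cs : List String} {i : Nat} (h : cs.getD i "" ≠ "O") : Tstep i cs = cs := by
  by_cases hic : i < cs.length
  · have hne : cs[i] ≠ "O" := by rwa [List.getD_eq_getElem _ _ hic] at h
    rw [Tstep, List.drop_eq_getElem_cons hic, fall_of_ne (cs[i]) (cs.drop (i + 1)) hne,
      ← List.drop_eq_getElem_cons hic, List.take_append_drop]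
  · rw [Tstep, List.drop_eq_nil_of_le (by omega), fall_nil, List.append_nil,
      List.take_of_length_le (by omega)]

theorem aInner_effect {g : List (List String)} {i : Nat} (hi : i < g.length) (j : Nat) :
    (aInner i g j).map (fun r => r.length) = g.map (fun r => r.length) ∧
    colj (aInner i g j) j = Tstep i (colj g j) ∧
    ∀ j', j' ≠ j → colj (aInner i g j) j' = colj g j' := by
  have hic : i < (colj g j).length := by rw [length_colj]; exact hi
  by_cases hO : (g.getD i []).getD j "" = "O"
  · have heq : aInner i g j =
        setCell (setCell g i j ".") (aWhile (setCell g i j ".") j (i + 1) - 1) j "O" := by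
      unfold aInner; rw [if_pos hO]
    have hjlen : j < (g.getD i []).length := cell_real g i j (by rw [hO]; decide)
    have hci : (colj g j)[i] = "O" := by
      have hg := getD_colj g i j
      rw [List.getD_eq_getElem _ _ hic] at hg
      rw [hg, hO]
    have hcol1 : colj (setCell g i j ".") j = (colj g j).set i "." :=
      colj_setCell_self g i j "." hjlen
    have hwhile : aWhile (setCell g i j ".") j (i + 1) =
        (i + 1) + dots ((colj g j).drop (i + 1)) := by
      rw [aWhile_eq, hcol1, List.drop_set_of_lt (by omega)]
    have hn1 : aWhile (setCell g i j ".") j (i + 1) - 1 = i + dots ((colj g j).drop (i + 1)) := by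
      rw [hwhile]; omega
    have hjlen2 : j < ((setCell g i j ".").getD (i + dots ((colj g j).drop (i + 1))) []).length := by
      by_cases hk : dots ((colj g j).drop (i + 1)) = 0
      · rw [hk, Nat.add_zero, setCell, getD_set_row g i _ hi]
        simpa using hjlen
      · apply cell_real
        rw [← getD_colj, hcol1, List.getD, List.getElem?_set_ne (by omega),
          ← List.getD]
        have hd : (colj g j).getD (i + dots ((colj g j).drop (i + 1))) "" =
            ((colj g j).drop (i + 1)).getD (dots ((colj g j).drop (i + 1)) - 1) "" := by
          have hidx : i + dots ((colj g j).drop (i + 1)) =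
              (i + 1) + (dots ((colj g j).drop (i + 1)) - 1) := by omega
          rw [List.getD, List.getD, List.getElem?_drop, hidx]
        rw [hd, dots_getD_dot _ _ (by omega)]
        decide
    refine ⟨?_, ?_, ?_⟩
    · rw [heq, rowlens_setCell, rowlens_setCell]
    · rw [heq, hn1, colj_setCell_self _ _ _ _ hjlen2, hcol1]
      rw [Tstep, List.drop_eq_getElem_cons hic, hci, fall_O,
        List.set_eq_take_cons_drop "." hic]
      have hlt : (List.take i (colj g j)).length = i := by
        simp [List.length_take]; omega
      rw [List.set_append, hlt, if_neg (by omega)]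
      congr 2
      omega
    · intro j' hj'
      rw [heq, colj_setCell_ne _ _ _ _ _ hj', colj_setCell_ne _ _ _ _ _ hj']
  · have heq : aInner i g j = g := by
      unfold aInner
      split
      · rename_i hc; exact absurd hc hO
      · rfl
    refine ⟨by rw [heq], ?_, fun j' _ => by rw [heq]⟩
    rw [heq, Tstep_noop (by rw [getD_colj]; exact hO)]

theorem aRow_fold (i : Nat) :
    ∀ (js : List Nat) (g : List (List String)), i < g.length → js.Nodup →
      ((js.foldl (aInner i) g).map (fun r => r.length) = g.map (fun r => r.length)) ∧
      ∀ j, colj (js.foldl (aInner i) g) j =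
        if j ∈ js then Tstep i (colj g j) else colj g j := by
  intro js
  induction js with
  | nil => intro g hg _; exact ⟨rfl, fun j => by simp⟩
  | cons j0 rest ih =>
    intro g hg hnd
    obtain ⟨hrl, hcol, hother⟩ := aInner_effect hg j0
    have hg' : i < (aInner i g j0).length := by rw [length_of_rowlens hrl]; exact hg
    obtain ⟨ih1, ih2⟩ := ih (aInner i g j0) hg' (by simpa using hnd.of_cons)
    refine ⟨ih1.trans hrl, ?_⟩
    intro j
    rw [List.foldl_cons, ih2 j]
    by_cases hjr : j ∈ rest
    · have hne : j ≠ j0 := fun hcon => (by simp [List.nodup_cons] at hnd; exact hnd.1 (hcon ▸ hjr))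
      rw [if_pos hjr, if_pos (by simp [hjr]), hother j hne]
    · rw [if_neg hjr]
      by_cases hjj : j = j0
      · subst hjj
        rw [if_pos (by simp), hcol]
      · rw [if_neg (by simp [hjj, hjr]), hother j hjj]

theorem aRow_effect {g : List (List String)} {i : Nat} (hi : i < g.length) :
    ((aRow g i).map (fun r => r.length) = g.map (fun r => r.length)) ∧
    ∀ j, colj (aRow g i) j = Tstep i (colj g j) := by
  obtain ⟨h1, h2⟩ := aRow_fold i (List.range ((g.getD i []).length)) g hi List.nodup_range
  refine ⟨h1, fun j => ?_⟩
  rw [aRow, h2 j]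
  by_cases hj : j ∈ List.range ((g.getD i []).length)
  · rw [if_pos hj]
  · rw [if_neg hj, Tstep_noop]
    rw [getD_colj, List.getD_eq_default]
    · decide
    · simpa using hj

theorem aOuter_fold :
    ∀ (is : List Nat) (g : List (List String)), (∀ i ∈ is, i < g.length) →
      ((is.foldl aRow g).map (fun r => r.length) = g.map (fun r => r.length)) ∧
      ∀ j, colj (is.foldl aRow g) j = applyT is (colj g j) := by
  intro is
  induction is with
  | nil => intro g _; exact ⟨rfl, fun j => rfl⟩
  | cons i0 rest ih =>
    intro g hmem
    have hi0 : i0 < g.length := hmem i0 (by simp)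
    obtain ⟨hrl, hcol⟩ := aRow_effect hi0
    obtain ⟨ih1, ih2⟩ := ih (aRow g i0)
      (fun i hi => by rw [length_of_rowlens hrl]; exact hmem i (by simp [hi]))
    exact ⟨ih1.trans hrl, fun j => by rw [List.foldl_cons, ih2 j, hcol j, applyT]⟩

-- loop-order bookkeeping: processing rows m-1 … 0 on a column

theorem am_Tstep (m : Nat) : ∀ c, am m (Tstep m c) = am (m + 1) c := by
  induction m with
  | zero =>
    intro c
    cases c with
    | nil => rw [Tstep]; simp [am, fall_nil]
    | cons x t => rw [Tstep]; simp [am]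
  | succ m ih =>
    intro c
    cases c with
    | nil => rw [Tstep]; simp [am, fall_nil]
    | cons x t =>
      have hT : Tstep (m + 1) (x :: t) = x :: Tstep m t := by
        rw [Tstep, Tstep, List.take_succ_cons, List.drop_succ_cons, List.cons_append]
      rw [hT]
      show fall (x :: am m (Tstep m t)) = fall (x :: am (m + 1) t)
      rw [ih t]

theorem applyT_range (m : Nat) : ∀ c, applyT ((List.range m).reverse) c = am m c := by
  induction m with
  | zero => intro c; rfl
  | succ m ih =>
    intro c
    rw [List.range_succ, List.reverse_append]
    show applyT (m :: (List.range m).reverse) c = _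
    rw [applyT, ih, am_Tstep]

theorem am_acol (c : List String) : ∀ m, c.length ≤ m + 1 → am m c = acol c := by
  induction c with
  | nil => intro m _; cases m <;> rfl
  | cons x t ih =>
    intro m hm
    cases m with
    | zero =>
      have ht : t = [] := by
        cases t with
        | nil => rfl
        | cons a b => simp at hm
      subst ht
      show [x] = fall (x :: acol [])
      rw [show acol [] = [] from rfl]
      unfold fall
      rfl
    | succ m =>
      show fall (x :: am m t) = fall (x :: acol t)
      rw [ih m (by simpa using hm)]

theorem A_result (g : List (List String)) :
    ((south_tilt g).map (fun r => r.length) = g.map (fun r => r.length)) ∧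
    ∀ j, colj (south_tilt g) j = acol (colj g j) := by
  obtain ⟨h1, h2⟩ := aOuter_fold ((List.range (g.length - 1)).reverse) g
    (fun i hi => by
      have : i < g.length - 1 := List.mem_range.mp (by simpa using hi)
      omega)
  refine ⟨h1, fun j => ?_⟩
  rw [south_tilt, h2 j, applyT_range, am_acol]
  rw [length_colj]
  omega

-- ---- B: from the grid loops to bcol ----

theorem applyB_append (l1 l2 : List Nat) (s : List String × Int) :
    applyB (l1 ++ l2) s = applyB l2 (applyB l1 s) := by
  induction l1 generalizing s with
  | nil => rfl
  | cons a t ih => rw [List.cons_append, applyB, applyB, ih]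

theorem applyB_shift (m : Nat) :
    ∀ (t : List String) (x : String) (l : Int), (m : Int) - 1 ≤ l →
      applyB (((List.range m).map (· + 1)).reverse) (x :: t, l + 1) =
        (x :: (applyB ((List.range m).reverse) (t, l)).1,
         (applyB ((List.range m).reverse) (t, l)).2 + 1) := by
  induction m with
  | zero => intro t x l _; rfl
  | succ m ih =>
    intro t x l hl
    have hl0 : (0 : Int) ≤ l := by push_cast at hl; omega
    have hrange : ((List.range (m + 1)).map (· + 1)).reverse =
        (m + 1) :: ((List.range m).map (· + 1)).reverse := by
      rw [List.range_succ, List.map_append, List.reverse_append]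
      rfl
    have hrange' : (List.range (m + 1)).reverse = m :: (List.range m).reverse := by
      rw [List.range_succ, List.reverse_append]
      rfl
    rw [hrange, hrange', applyB, applyB]
    have hget : (x :: t).getD (m + 1) "" = t.getD m "" := List.getD_cons_succ
    by_cases hO : t.getD m "" = "O"
    · have h1 : bStep (m + 1) (x :: t, l + 1) =
          (x :: ((t.set m ".").set l.toNat "O"), (l - 1) + 1) := by
        unfold bStep
        rw [if_pos (by rw [hget]; exact hO)]
        have h2 : (l + 1).toNat = l.toNat + 1 := by omega
        rw [List.set_cons_succ, h2, List.set_cons_succ]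
        simp only [Prod.mk.injEq]
        exact ⟨trivial, by omega⟩
      have h3 : bStep m (t, l) = ((t.set m ".").set l.toNat "O", l - 1) := by
        unfold bStep; rw [if_pos hO]
      rw [h1, h3, ih _ x (l - 1) (by push_cast at hl ⊢; omega)]
    · by_cases hd : t.getD m "" = "."
      · have h1 : bStep (m + 1) (x :: t, l + 1) = (x :: t, l + 1) := by
          unfold bStep
          rw [if_neg (by rw [hget]; exact hO), if_pos (by rw [hget]; exact hd)]
        have h3 : bStep m (t, l) = (t, l) := by
          unfold bStep; rw [if_neg hO, if_pos hd]
        rw [h1, h3, ih _ x l (by push_cast at hl ⊢; omega)]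
      · have h1 : bStep (m + 1) (x :: t, l + 1) = (x :: t, ((m : Int) - 1) + 1) := by
          unfold bStep
          rw [if_neg (by rw [hget]; exact hO), if_neg (by rw [hget]; exact hd)]
          simp only [Prod.mk.injEq]
          exact ⟨trivial, by push_cast; ring⟩
        have h3 : bStep m (t, l) = (t, (m : Int) - 1) := by
          unfold bStep; rw [if_neg hO, if_neg hd]
        rw [h1, h3, ih _ x ((m : Int) - 1) (by omega)]

theorem applyB_bcol (c : List String) :
    applyB ((List.range c.length).reverse) (c, (c.length : Int) - 1) = bcol c := by
  induction c with
  | nil => rfl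
  | cons x t ih =>
    have hmap : List.map Nat.succ (List.range t.length) =
        (List.range t.length).map (· + 1) := by
      simp [Nat.succ_eq_add_one]
    rw [show (x :: t).length = t.length + 1 from rfl, List.range_succ_eq_map,
      List.reverse_cons, hmap, applyB_append]
    have hinit : ((t.length + 1 : Nat) : Int) - 1 = ((t.length : Int) - 1) + 1 := by
      push_cast; ring
    rw [hinit, applyB_shift t.length t x ((t.length : Int) - 1) (by omega), ih]
    show bStep 0 (x :: (bcol t).1, (bcol t).2 + 1) = bcol (x :: t)
    by_cases hO : x = "O"
    · unfold bStep
      rw [if_pos (by rw [List.getD_cons_zero]; exact hO)]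
      rw [bcol]
      simp [hO, List.set_cons_zero]
    · by_cases hd : x = "."
      · unfold bStep
        rw [if_neg (by rw [List.getD_cons_zero]; exact hO),
          if_pos (by rw [List.getD_cons_zero]; exact hd)]
        rw [bcol]
        simp [hO, hd]
      · unfold bStep
        rw [if_neg (by rw [List.getD_cons_zero]; exact hO),
          if_neg (by rw [List.getD_cons_zero]; exact hd)]
        rw [bcol]
        simp [hO, hd]

theorem bDescend (j : Nat) :
    ∀ (m : Nat) (g : List (List String)) (land : Int), Qinv (colj g j) m land →
      ((((List.range m).reverse).foldl (bInner j) (g, land)).1.map (fun r => r.length)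
          = g.map (fun r => r.length)) ∧
      colj (((List.range m).reverse).foldl (bInner j) (g, land)).1 j
          = (applyB ((List.range m).reverse) (colj g j, land)).1 ∧
      (∀ j', j' ≠ j →
        colj (((List.range m).reverse).foldl (bInner j) (g, land)).1 j' = colj g j') ∧
      (((List.range m).reverse).foldl (bInner j) (g, land)).2
          = (applyB ((List.range m).reverse) (colj g j, land)).2 := by
  intro m
  induction m with
  | zero => intro g land _; exact ⟨rfl, rfl, fun _ _ => rfl, rfl⟩
  | succ m ih =>
    intro g land hQ
    have hrange : (List.range (m + 1)).reverse = m :: (List.range m).reverse := by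
      rw [List.range_succ, List.reverse_append]
      rfl
    have hcell : (colj g j).getD m "" = (g.getD m []).getD j "" := getD_colj g m j
    rw [hrange]
    -- one step at row m, then the induction hypothesis on rows m-1 … 0
    by_cases hguard : (g.getD m []).length ≤ j
    · -- missing cell: blocker in both programs
      have hA : bInner j (g, land) m = (g, (m : Int) - 1) := by
        unfold bInner; rw [if_pos hguard]
      have hempty : (colj g j).getD m "" = "" := by
        rw [hcell, List.getD_eq_default _ _ hguard]
      have hB : bStep m (colj g j, land) = (colj g j, (m : Int) - 1) := by
        unfold bStep
        rw [if_neg (by rw [hempty]; decide), if_neg (by rw [hempty]; decide)]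
      obtain ⟨ih1, ih2, ih3, ih4⟩ := ih g ((m : Int) - 1)
        ⟨le_refl _, fun q hq hq' => by omega⟩
      rw [List.foldl_cons, applyB, hA, hB]
      exact ⟨ih1, ih2, ih3, ih4⟩
    · push_neg at hguard
      by_cases hO : (g.getD m []).getD j "" = "O"
      · -- a rock: it lands at index `land`, which the invariant shows is a real "." cell
        have hml : m < g.length := by
          by_contra hc
          rw [List.getD_eq_default _ _ (by omega)] at hguard
          simp at hguard
        have hland : (m : Int) ≤ land := by
          have := hQ.1
          omega
        have hA : bInner j (g, land) m =
            (setCell (setCell g m j ".") land.toNat j "O", land - 1) := by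
          unfold bInner
          rw [if_neg (show ¬((g.getD m []).length ≤ j) by omega), if_pos hO]
        have hB : bStep m (colj g j, land) =
            (((colj g j).set m ".").set land.toNat "O", land - 1) := by
          unfold bStep; rw [if_pos (by rw [hcell]; exact hO)]
        have hcol1 : colj (setCell g m j ".") j = (colj g j).set m "." :=
          colj_setCell_self g m j "." hguard
        have hjlen2 : j < ((setCell g m j ".").getD land.toNat []).length := by
          by_cases hpm : land.toNat = m
          · rw [hpm, setCell, getD_set_row g m _ hml]
            simpa using hguard
          · have hpgt : m < land.toNat := by omega
            apply cell_real
            rw [← getD_colj, hcol1, List.getD, List.getElem?_set_ne (by omega), ← List.getD]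
            rw [hQ.2 land.toNat (by omega) (by omega)]
            decide
        have hcolstep : colj (setCell (setCell g m j ".") land.toNat j "O") j =
            ((colj g j).set m ".").set land.toNat "O" := by
          rw [colj_setCell_self _ _ _ _ hjlen2, hcol1]
        have hQ' : Qinv (((colj g j).set m ".").set land.toNat "O") m (land - 1) := by
          refine ⟨by omega, ?_⟩
          intro q hqm hql
          have hqp : q ≠ land.toNat := by omega
          rw [List.getD, List.getElem?_set_ne (by omega), ← List.getD]
          by_cases hqm' : q = m
          · subst hqm'
            rw [List.getD, List.getElem?_set_self (by rw [length_colj]; exact hml)]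
            rfl
          · rw [List.getD, List.getElem?_set_ne (by omega), ← List.getD]
            exact hQ.2 q (by omega) (by omega)
        obtain ⟨ih1, ih2, ih3, ih4⟩ := ih (setCell (setCell g m j ".") land.toNat j "O")
          (land - 1) (by rw [hcolstep]; exact hQ')
        rw [List.foldl_cons, applyB, hA, hB]
        refine ⟨ih1.trans (by rw [rowlens_setCell, rowlens_setCell]), ?_, ?_, ?_⟩
        · rw [ih2, hcolstep]
        · intro j' hj'
          rw [ih3 j' hj', colj_setCell_ne _ _ _ _ _ hj', colj_setCell_ne _ _ _ _ _ hj']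
        · rw [ih4, hcolstep]
      · by_cases hd : (g.getD m []).getD j "" = "."
        · have hA : bInner j (g, land) m = (g, land) := by
            unfold bInner
            rw [if_neg (show ¬((g.getD m []).length ≤ j) by omega), if_neg hO, if_pos hd]
          have hB : bStep m (colj g j, land) = (colj g j, land) := by
            unfold bStep
            rw [if_neg (by rw [hcell]; exact hO), if_pos (by rw [hcell]; exact hd)]
          obtain ⟨ih1, ih2, ih3, ih4⟩ := ih g land
            ⟨by have := hQ.1; omega, fun q hq hq' => by
              by_cases hqm : q = m
              · subst hqm; rw [hcell]; exact hd
              · exact hQ.2 q (by omega) hq'⟩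
          rw [List.foldl_cons, applyB, hA, hB]
          exact ⟨ih1, ih2, ih3, ih4⟩
        · have hA : bInner j (g, land) m = (g, (m : Int) - 1) := by
            unfold bInner
            rw [if_neg (show ¬((g.getD m []).length ≤ j) by omega), if_neg hO, if_neg hd]
          have hB : bStep m (colj g j, land) = (colj g j, (m : Int) - 1) := by
            unfold bStep
            rw [if_neg (by rw [hcell]; exact hO), if_neg (by rw [hcell]; exact hd)]
          obtain ⟨ih1, ih2, ih3, ih4⟩ := ih g ((m : Int) - 1)
            ⟨le_refl _, fun q hq hq' => by omega⟩
          rw [List.foldl_cons, applyB, hA, hB]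
          exact ⟨ih1, ih2, ih3, ih4⟩

theorem bOuter_fold (rows : Nat) :
    ∀ (js : List Nat) (g : List (List String)), g.length = rows → js.Nodup →
      ((js.foldl
          (fun g j => (((List.range rows).reverse).foldl (bInner j) (g, (rows : Int) - 1)).1)
          g).map (fun r => r.length) = g.map (fun r => r.length)) ∧
      ∀ j, colj (js.foldl
          (fun g j => (((List.range rows).reverse).foldl (bInner j) (g, (rows : Int) - 1)).1)
          g) j = if j ∈ js then (bcol (colj g j)).1 else colj g j := by
  intro js
  induction js with
  | nil => intro g _ _; exact ⟨rfl, fun j => by simp⟩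
  | cons j0 rest ih =>
    intro g hg hnd
    obtain ⟨hrl, hcol, hother, -⟩ := bDescend j0 rows g ((rows : Int) - 1)
      ⟨le_refl _, fun q hq hq' => by omega⟩
    have hclen : (colj g j0).length = rows := by rw [length_colj, hg]
    have hcol' : colj (((List.range rows).reverse).foldl (bInner j0) (g, (rows : Int) - 1)).1 j0
        = (bcol (colj g j0)).1 := by
      rw [hcol, ← hclen, applyB_bcol]
    obtain ⟨ih1, ih2⟩ := ih _ ((length_of_rowlens hrl).trans hg) (by simpa using hnd.of_cons)
    refine ⟨ih1.trans hrl, ?_⟩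
    intro j
    rw [List.foldl_cons, ih2 j]
    by_cases hjr : j ∈ rest
    · have hne : j ≠ j0 := fun hcon => (by simp [List.nodup_cons] at hnd; exact hnd.1 (hcon ▸ hjr))
      rw [if_pos hjr, if_pos (by simp [hjr]), hother j hne]
    · rw [if_neg hjr]
      by_cases hjj : j = j0
      · subst hjj
        rw [if_pos (by simp), hcol']
      · rw [if_neg (by simp [hjj, hjr]), hother j hjj]

theorem B_result (g : List (List String)) :
    ((south_tilt_alt g).map (fun r => r.length) = g.map (fun r => r.length)) ∧
    ∀ j, colj (south_tilt_alt g) j =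
      if j ∈ List.range ((g.map (fun row => row.length)).foldl max 0)
      then (bcol (colj g j)).1 else colj g j := by
  obtain ⟨h1, h2⟩ := bOuter_fold g.length
    (List.range ((g.map (fun row => row.length)).foldl max 0)) g rfl List.nodup_range
  exact ⟨h1, h2⟩

-- columns beyond every row's length hold only "" blockers, which acol leaves in place

theorem acol_id_of_empty : ∀ (c : List String), (∀ x ∈ c, x = "") → acol c = c := by
  intro c
  induction c with
  | nil => intro _; rfl
  | cons x t ih =>
    intro h
    have hx : x = "" := h x (by simp)
    show fall (x :: acol t) = x :: t
    rw [ih (fun y hy => h y (by simp [hy])), fall_of_ne _ _ (by rw [hx]; decide)]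

-- ---- grids are determined by their row lengths and columns ----

theorem grid_ext {g1 g2 : List (List String)}
    (h1 : g1.map (fun r => r.length) = g2.map (fun r => r.length))
    (h : ∀ j, colj g1 j = colj g2 j) : g1 = g2 := by
  apply List.ext_getElem (length_of_rowlens h1)
  intro i hi1 hi2
  have hr : g1[i].length = g2[i].length := by
    have hlen2 : (g1.getD i []).length = (g2.getD i []).length := by
      rw [getD_rowlen, getD_rowlen, h1]
    rwa [List.getD_eq_getElem g1 [] hi1, List.getD_eq_getElem g2 [] hi2] at hlen2
  apply List.ext_getElem hr
  intro j hj1 hj2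
  have hc := congrArg (fun c => c.getD i "") (h j)
  simp only [getD_colj] at hc
  rw [List.getD_eq_getElem g1 [] hi1, List.getD_eq_getElem g2 [] hi2] at hc
  rwa [List.getD_eq_getElem _ _ hj1, List.getD_eq_getElem _ _ hj2] at hc

-- ===== VERDICT (by name: the statement is the Claim_ definition above) =====
theorem south_tilt_spec : Claim_equal_south_tilt := by
  intro lines _dom _pre
  unfold Spec_south_tilt
  obtain ⟨hA1, hA2⟩ := A_result lines
  obtain ⟨hB1, hB2⟩ := B_result lines
  apply grid_ext (hA1.trans hB1.symm)
  intro j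
  rw [hA2 j, hB2 j]
  by_cases hj : j ∈ List.range ((lines.map (fun row => row.length)).foldl max 0)
  · rw [if_pos hj, (col_eq (colj lines j)).1]
  · rw [if_neg hj]
    apply acol_id_of_empty
    intro x hx
    obtain ⟨r, hr, hxr⟩ := List.mem_map.mp hx
    have hle : r.length ≤ (lines.map (fun row => row.length)).foldl max 0 :=
      (PySem.List.le_foldl_max (lines.map (fun row => row.length)) 0).2 r.length
        (List.mem_map.mpr ⟨r, hr, rfl⟩)
    rw [← hxr, List.getD_eq_default _ _ (by simp at hj; omega)]
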